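-- pv_equiv track=rewrite | github.com/hyoeun0101/sparta_algorithm | 2st_week/07_02_homework.py | is_available_to_order
-- ===== SOURCE A (Python) =====
-- def is_available_to_order(menus, orders):
--     # binary search
--     # 시간복잡도 : O(M*logN) , orders의 개수 : M, menus의 길이 : N
--     menus.sort()
--     for order in orders:
--         if not binary_search(order, menus):
--             return False
--     return True
--
--     # set사용
--     # 리스트 in연산자 사용 : O(N)
--     # set, dict in연산자 사용 : O(1), 최악- O(N)
--     # 따라서 set으로 바꾼 후 in연산을 하는게 좋음
--     menus_set = set(menus)
--     for order in orders:
--         if order not in menus_set: # menus_set.__contains__(order)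
--             return False
--     return True
--
-- def binary_search(target, array):
--     first=0
--     last=len(array)-1
--     while first <= last:
--         mid = (first+last)//2
--         if target == array[mid]:
--             return True
--         elif target < array[mid]:
--             last = mid-1
--         else:
--             first = mid+1
--
--     return False
-- ===== SOURCE B (Python) =====
-- def is_available_to_order(menus, orders):
--     # merge sweep over both lists in sorted order (alternative to per-order binary search);
--     # menus.sort() kept for the same in-place mutation as the original
--     menus.sort()
--     j = 0
--     for order in sorted(orders):
--         while j < len(menus) and menus[j] < order:
--             j += 1
--         if j == len(menus) or menus[j] != order:
--             return False
--     return True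
-- ===== Notes on version B (the rewrite author's own statement) =====
-- stated objective: alternative
-- what changed: Replaces the per-order binary search with a single two-pointer merge sweep over the sorted menus and a sorted copy of the orders (the match pointer is not advanced on equality, so duplicate orders still pass).
import Mathlib
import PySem

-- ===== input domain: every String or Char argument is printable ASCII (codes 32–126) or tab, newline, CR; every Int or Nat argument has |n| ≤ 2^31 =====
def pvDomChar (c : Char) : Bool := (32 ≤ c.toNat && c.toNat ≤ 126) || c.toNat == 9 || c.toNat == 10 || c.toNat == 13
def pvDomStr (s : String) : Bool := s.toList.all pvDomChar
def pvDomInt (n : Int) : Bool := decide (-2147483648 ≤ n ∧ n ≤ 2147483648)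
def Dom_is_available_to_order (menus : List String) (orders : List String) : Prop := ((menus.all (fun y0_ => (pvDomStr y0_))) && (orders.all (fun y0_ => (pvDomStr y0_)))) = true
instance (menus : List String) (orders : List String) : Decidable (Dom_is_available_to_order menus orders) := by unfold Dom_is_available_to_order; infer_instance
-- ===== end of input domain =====

-- ===== PORT A =====
-- B replaces per-order binary search by one merge sweep over sorted menus and a sorted copy
-- of orders (alternative decomposition, similar cost); both sort menus in place in Python —
-- the equivalence proved here is about the return value.

-- while-loop of binary_search: first/last window shrinks each iteration
def bsLoop (target : String) (array : List String) (first last : Int) : Bool :=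
  if h : first ≤ last then
    let mid := PySem.Int.floordiv (first + last) 2
    if target = PySem.List.pyGetD array mid "" then true
    else if target < PySem.List.pyGetD array mid "" then bsLoop target array first (mid - 1)
    else bsLoop target array (mid + 1) last
  else false
termination_by (last - first + 1).toNat
decreasing_by
  · have hb := PySem.Int.floordiv_two_mid_bounds h
    omega
  · have hb := PySem.Int.floordiv_two_mid_bounds h
    omega

def binary_search (target : String) (array : List String) : Bool :=
  bsLoop target array 0 ((array.length : Int) - 1)

def is_available_to_order (menus : List String) (orders : List String) : Bool :=
  let m := PySem.List.sorted menus (fun x => x) false   -- menus.sort()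
  orders.all (fun order => binary_search order m)       -- for-loop with early return False

-- ===== PORT B =====
-- inner while loop: advance j while j < len(menus) and menus[j] < order
def advLoop (menus : List String) (order : String) (j : Nat) : Nat :=
  if h : j < menus.length ∧ menus.getD j "" < order then advLoop menus order (j + 1) else j
termination_by menus.length - j
decreasing_by omega

-- for-loop over the sorted orders, carrying the sweep index j
def bLoop (menus : List String) (os : List String) (j : Nat) : Bool :=
  match os with
  | [] => true
  | order :: rest =>
    let j' := advLoop menus order j
    if j' = menus.length ∨ menus.getD j' "" ≠ order then false
    else bLoop menus rest j'

def is_available_to_order_alt (menus : List String) (orders : List String) : Bool :=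
  let m := PySem.List.sorted menus (fun x => x) false   -- menus.sort()
  bLoop m (PySem.List.sorted orders (fun x => x) false) 0

-- ===== PRECONDITION & SPEC =====
def Spec_is_available_to_order (menus : List String) (orders : List String) (out : Bool) : Prop := out = is_available_to_order_alt menus orders
instance (menus : List String) (orders : List String) (out : Bool) : Decidable (Spec_is_available_to_order menus orders out) := by unfold Spec_is_available_to_order; infer_instance

-- ===== CLAIM (what is proved, stated in full; the proofs are below) =====
def Claim_equal_is_available_to_order : Prop := ∀ (menus : List String) (orders : List String), Dom_is_available_to_order menus orders → Spec_is_available_to_order menus orders (is_available_to_order menus orders)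

-- ===== LEMMAS AND PROOFS =====

-- monotone access into a (≤)-sorted list
theorem pv_mono (m : List String) (hm : m.Pairwise (· ≤ ·)) (i j : Nat) (hij : i ≤ j)
    (hj : j < m.length) : m[i]'(by omega) ≤ m[j] := by
  rcases Nat.eq_or_lt_of_le hij with h | h
  · subst h; exact le_refl _
  · exact List.pairwise_iff_getElem.mp hm i j (by omega) hj h

-- the binary-search window loop finds target iff it sits somewhere in [first, last]
theorem bsLoop_iff (t : String) (m : List String) (hm : m.Pairwise (· ≤ ·)) :
    ∀ (n : Nat) (first last : Int), (last - first + 1).toNat = n → 0 ≤ first →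
    last < (m.length : Int) →
    (bsLoop t m first last = true ↔
      ∃ i : Nat, first ≤ (i : Int) ∧ (i : Int) ≤ last ∧ m[i]? = some t) := by
  intro n
  induction n using Nat.strong_induction_on with
  | _ n ih =>
    intro first last hn h0 hl
    rw [bsLoop]
    by_cases h : first ≤ last
    · rw [dif_pos h]
      have hb := PySem.Int.floordiv_two_mid_bounds (lo := first) (hi := last) h
      set mid := PySem.Int.floordiv (first + last) 2 with hmid
      have hmid0 : 0 ≤ mid := le_trans h0 hb.1
      have hmidl : mid < (m.length : Int) := lt_of_le_of_lt hb.2 hl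
      have hget : PySem.List.pyGetD m mid "" = m[mid.toNat]'(by omega) :=
        PySem.List.pyGetD_eq_getElem m "" hmid0 hmidl
      by_cases he : t = PySem.List.pyGetD m mid ""
      · rw [if_pos he]
        refine ⟨fun _ => ⟨mid.toNat, by omega, by omega, ?_⟩, fun _ => rfl⟩
        rw [List.getElem?_eq_getElem (by omega), ← hget, ← he]
      · rw [if_neg he]
        by_cases hlt : t < PySem.List.pyGetD m mid ""
        · rw [if_pos hlt]
          rw [ih (mid - 1 - first + 1).toNat (by omega) first (mid - 1) rfl h0 (by omega)]
          constructor
          · rintro ⟨i, hi1, hi2, hi3⟩; exact ⟨i, hi1, by omega, hi3⟩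
          · rintro ⟨i, hi1, hi2, hi3⟩
            refine ⟨i, hi1, ?_, hi3⟩
            by_contra hc
            have hile : mid.toNat ≤ i := by omega
            have hilen : i < m.length := (List.getElem?_eq_some_iff.mp hi3).1
            have := pv_mono m hm mid.toNat i hile hilen
            rw [(List.getElem?_eq_some_iff.mp hi3).2] at this
            rw [hget] at hlt
            exact absurd (lt_of_le_of_lt this hlt) (lt_irrefl _)
        · rw [if_neg hlt]
          have hvt : PySem.List.pyGetD m mid "" < t :=
            lt_of_le_of_ne (not_lt.mp hlt) (fun hh => he hh.symm)
          rw [ih (last - (mid + 1) + 1).toNat (by omega) (mid + 1) last rfl (by omega) hl]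
          constructor
          · rintro ⟨i, hi1, hi2, hi3⟩; exact ⟨i, by omega, hi2, hi3⟩
          · rintro ⟨i, hi1, hi2, hi3⟩
            refine ⟨i, ?_, hi2, hi3⟩
            by_contra hc
            have hile : i ≤ mid.toNat := by omega
            have := pv_mono m hm i mid.toNat hile (by omega)
            rw [(List.getElem?_eq_some_iff.mp hi3).2, ← hget] at this
            exact absurd (lt_of_lt_of_le hvt this) (lt_irrefl _)
    · rw [dif_neg h]
      constructor
      · intro hh; exact absurd hh (by simp)
      · rintro ⟨i, hi1, hi2, _⟩; omega

theorem binary_search_eq (t : String) (m : List String) (hm : m.Pairwise (· ≤ ·)) :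
    binary_search t m = decide (t ∈ m) := by
  have h := bsLoop_iff t m hm _ 0 ((m.length : Int) - 1) rfl (le_refl 0) (by omega)
  apply Bool.coe_iff_coe.mp
  rw [binary_search, h, decide_eq_true_eq, List.mem_iff_getElem?]
  constructor
  · rintro ⟨i, _, _, hi⟩; exact ⟨i, hi⟩
  · rintro ⟨i, hi⟩
    have : i < m.length := (List.getElem?_eq_some_iff.mp hi).1
    exact ⟨i, by omega, by omega, hi⟩

-- the inner while loop: j only advances over elements < order, and stops at the first
-- position (if any) that is not < order
theorem advLoop_spec (m : List String) (o : String) :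
    ∀ (n j : Nat), m.length - j = n → j ≤ m.length →
    j ≤ advLoop m o j ∧ advLoop m o j ≤ m.length ∧
    (∀ i, j ≤ i → i < advLoop m o j → ∀ (h : i < m.length), m[i] < o) ∧
    (advLoop m o j = m.length ∨
      ∃ h : advLoop m o j < m.length, ¬ m[advLoop m o j] < o) := by
  intro n
  induction n with
  | zero =>
    intro j hn hj
    have hje : j = m.length := by omega
    rw [advLoop, dif_neg (by omega)]
    exact ⟨le_refl _, hj, fun i h1 h2 _ => by omega, Or.inl hje⟩
  | succ k ih =>
    intro j hn hj
    rw [advLoop]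
    by_cases hc : j < m.length ∧ m.getD j "" < o
    · rw [dif_pos hc]
      obtain ⟨ih1, ih2, ih3, ih4⟩ := ih (j + 1) (by omega) (by omega)
      refine ⟨by omega, ih2, ?_, ih4⟩
      intro i h1 h2 hi
      rcases Nat.eq_or_lt_of_le h1 with h | h
      · subst h
        rw [List.getD_eq_getElem m "" hc.1] at hc
        exact hc.2
      · exact ih3 i h h2 hi
    · rw [dif_neg hc]
      push Not at hc
      refine ⟨le_refl _, hj, fun i h1 h2 _ => by omega, ?_⟩
      rcases Nat.lt_or_ge j m.length with h | h
      · refine Or.inr ⟨h, ?_⟩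
        have := hc h
        rwa [List.getD_eq_getElem m "" h] at this
      · exact Or.inl (by omega)

-- the merge sweep over a sorted order list answers "every order is a member"
theorem bLoop_iff (m : List String) (hm : m.Pairwise (· ≤ ·)) :
    ∀ (os : List String) (j : Nat), j ≤ m.length → os.Pairwise (· ≤ ·) →
    (∀ i, i < j → ∀ (h : i < m.length), ∀ o ∈ os, m[i] < o) →
    bLoop m os j = decide (∀ o ∈ os, o ∈ m) := by
  intro os
  induction os with
  | nil => intro j _ _ _; rw [bLoop]; simp
  | cons o rest ih =>
    intro j hj hpo hpre
    rw [bLoop]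
    obtain ⟨h1, h2, h3, h4⟩ := advLoop_spec m o (m.length - j) j rfl hj
    set j' := advLoop m o j with hj'
    by_cases hcase : j' = m.length ∨ m.getD j' "" ≠ o
    · rw [if_pos hcase]
      have hno : o ∉ m := by
        intro hmem
        obtain ⟨i, hi, hieq⟩ := List.getElem_of_mem hmem
        rcases Nat.lt_or_ge i j' with hlt | hge
        · rcases Nat.lt_or_ge i j with ha | hb
          · exact absurd (hieq ▸ hpre i ha hi o (List.mem_cons_self)) (lt_irrefl o)
          · exact absurd (hieq ▸ h3 i hb hlt hi) (lt_irrefl o)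
        · rcases h4 with h4 | ⟨hlt', hnlt⟩
          · omega
          · rcases hcase with hc | hc
            · omega
            · have hmono := pv_mono m hm j' i hge hi
              have : m[j'] = o := le_antisymm (hieq ▸ hmono) (not_lt.mp hnlt)
              exact hc (by rw [List.getD_eq_getElem m "" hlt', this])
      simp [hno]
    · rw [if_neg hcase]
      push Not at hcase
      obtain ⟨hne, heq⟩ := hcase
      have hlt' : j' < m.length := by omega
      have homem : o ∈ m := by
        rw [← heq, List.getD_eq_getElem m "" hlt']
        exact List.getElem_mem hlt' 
      rw [ih j' h2 (List.Pairwise.of_cons hpo) ?_]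
      · simp [homem]
      · intro i hij' hi o' ho'
        have hoo' : o ≤ o' := (List.pairwise_cons.mp hpo).1 o' ho'
        rcases Nat.lt_or_ge i j with ha | hb
        · exact hpre i ha hi o' (List.mem_cons_of_mem o ho')
        · exact lt_of_lt_of_le (h3 i hb hij' hi) hoo'

theorem a_eq (menus orders : List String) :
    is_available_to_order menus orders = decide (∀ o ∈ orders, o ∈ menus) := by
  rw [is_available_to_order]
  have hm := PySem.List.sorted_pairwise menus (fun x => x)
  apply Bool.coe_iff_coe.mp
  rw [List.all_eq_true, decide_eq_true_eq]
  constructor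
  · intro h o ho
    have := h o ho
    rw [binary_search_eq o _ hm, decide_eq_true_eq, PySem.List.mem_sorted] at this
    exact this
  · intro h o ho
    rw [binary_search_eq o _ hm, decide_eq_true_eq, PySem.List.mem_sorted]
    exact h o ho

theorem b_eq (menus orders : List String) :
    is_available_to_order_alt menus orders = decide (∀ o ∈ orders, o ∈ menus) := by
  rw [is_available_to_order_alt]
  have hm := PySem.List.sorted_pairwise menus (fun x => x)
  have ho := PySem.List.sorted_pairwise orders (fun x => x)
  rw [bLoop_iff _ hm _ 0 (Nat.zero_le _) ho (fun i hi => by omega)]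
  apply decide_eq_decide.mpr
  constructor
  · intro h o hoo
    have := h o (by rw [PySem.List.mem_sorted]; exact hoo)
    rwa [PySem.List.mem_sorted] at this
  · intro h o hoo
    rw [PySem.List.mem_sorted]
    exact h o (by rwa [PySem.List.mem_sorted] at hoo)

-- ===== VERDICT (by name: the statement is the Claim_ definition above) =====
theorem is_available_to_order_spec : Claim_equal_is_available_to_order := by
  intro menus orders _
  unfold Spec_is_available_to_order
  rw [a_eq, b_eq]
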